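-- pv_equiv track=rewrite | github.com/adnathanail/aoc | 2025/python/day06/part2.py | get_column_widths
-- ===== SOURCE A (Python) =====
-- def get_column_widths(operands_row):
--     """
--     Given the row of operands, extract the width of each column
--     as a list of integers
--     """
--     out = []
--     n = 0
--     for char in operands_row[1:]:
--         n += 1
--         if char != " ":
--             out.append(n)
--             n = 0
--
--     n += 1
--     out.append(n)
--     return out
-- ===== SOURCE B (Python) =====
-- def get_column_widths(operands_row):
--     """
--     Given the row of operands, extract the width of each column
--     as a list of integers
--     """
--     tail = operands_row[1:]
--     marks = [-1] + [i for i, c in enumerate(tail) if c != " "] + [len(tail)]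
--     return [marks[k + 1] - marks[k] for k in range(len(marks) - 1)]
-- ===== Notes on version B (the rewrite author's own statement) =====
-- stated objective: alternative
-- what changed: Replaces the running-counter accumulator loop with a two-phase position-diff strategy: collect the indices of non-space characters (with -1 and len(tail) sentinels) and return consecutive differences.
import Mathlib
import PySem

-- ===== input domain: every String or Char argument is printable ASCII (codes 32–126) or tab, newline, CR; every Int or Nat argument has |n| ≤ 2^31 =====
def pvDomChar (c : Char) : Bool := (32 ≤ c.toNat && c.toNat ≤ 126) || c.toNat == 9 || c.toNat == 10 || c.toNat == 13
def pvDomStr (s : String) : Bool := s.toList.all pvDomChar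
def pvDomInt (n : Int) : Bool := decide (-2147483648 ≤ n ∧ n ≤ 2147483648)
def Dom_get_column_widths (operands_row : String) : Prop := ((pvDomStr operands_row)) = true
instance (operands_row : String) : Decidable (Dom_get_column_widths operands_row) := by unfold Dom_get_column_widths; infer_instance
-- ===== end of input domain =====

-- B replaces A's running-counter accumulator loop by collecting marker positions and diffing them; objective: alternative (same O(n) cost).

-- ===== PORT A =====
-- loop body of A: n += 1; if char != " ": out.append(n); n = 0
def pvStepA (st : List Int × Int) (c : Char) : List Int × Int :=
  let n := st.2 + 1
  if c ≠ ' ' then (st.1 ++ [n], 0) else (st.1, n)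

def get_column_widths (operands_row : String) : List Int :=
  let st := (PySem.List.slice operands_row.toList (some 1) none).foldl pvStepA ([], 0)
  st.1 ++ [st.2 + 1]

-- ===== PORT B =====
-- [i for i, c in enumerate(tail) if c != " "], enumerating from index i
def pvPosFrom (i : Int) : List Char → List Int
  | [] => []
  | c :: cs => if c ≠ ' ' then i :: pvPosFrom (i + 1) cs else pvPosFrom (i + 1) cs

def get_column_widths_alt (operands_row : String) : List Int :=
  let tail := PySem.List.slice operands_row.toList (some 1) none
  let marks : List Int := -1 :: (pvPosFrom 0 tail ++ [(tail.length : Int)])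
  -- [marks[k+1] - marks[k] for k in range(len(marks)-1)] = adjacent differences
  (marks.zip marks.tail).map (fun p => p.2 - p.1)

-- ===== PRECONDITION & SPEC =====
def Spec_get_column_widths (operands_row : String) (out : List Int) : Prop := out = get_column_widths_alt operands_row
instance (operands_row : String) (out : List Int) : Decidable (Spec_get_column_widths operands_row out) := by unfold Spec_get_column_widths; infer_instance

-- ===== CLAIM (what is proved, stated in full; the proofs are below) =====
def Claim_equal_get_column_widths : Prop := ∀ (operands_row : String), Dom_get_column_widths operands_row → Spec_get_column_widths operands_row (get_column_widths operands_row)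

-- ===== LEMMAS AND PROOFS =====

-- adjacent differences of (p :: xs), written recursively
def pvDiffs (p : Int) : List Int → List Int
  | [] => []
  | x :: xs => (x - p) :: pvDiffs x xs

theorem pvZip_diffs (xs : List Int) (p : Int) :
    (((p :: xs).zip xs).map (fun q => q.2 - q.1)) = pvDiffs p xs := by
  induction xs generalizing p with
  | nil => rfl
  | cons x xs ih => simp [pvDiffs, ← ih x, List.zip]

theorem pvLoop_eq : ∀ (cs : List Char) (out : List Int) (n i : Int),
    (cs.foldl pvStepA (out, n)).1 ++ [(cs.foldl pvStepA (out, n)).2 + 1]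
      = out ++ pvDiffs (i - n - 1) (pvPosFrom i cs ++ [i + (cs.length : Int)]) := by
  intro cs
  induction cs with
  | nil =>
    intro out n i
    simp [pvPosFrom, pvDiffs]
    ring
  | cons c cs ih =>
    intro out n i
    by_cases hc : c = ' '
    · have h := ih out (n + 1) (i + 1)
      simp [pvStepA, hc, pvPosFrom] at h ⊢
      rw [h]
      ring_nf
    · have h := ih (out ++ [n + 1]) 0 (i + 1)
      simp [pvStepA, hc, pvPosFrom, pvDiffs] at h ⊢
      rw [h]
      have : i - (i - n - 1) = n + 1 := by ring
      simp [this]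
      ring_nf

-- ===== VERDICT (by name: the statement is the Claim_ definition above) =====
theorem get_column_widths_spec : Claim_equal_get_column_widths := by
  intro s _
  unfold Spec_get_column_widths get_column_widths get_column_widths_alt
  dsimp only [List.tail_cons]
  rw [pvZip_diffs]
  have h := pvLoop_eq (PySem.List.slice s.toList (some 1) none) [] 0 0
  simpa using h
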